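-- pv_equiv track=rewrite | github.com/l-gallucci/MetalGenie-Evo | src/metalgenie_evo/cli.py | cluster_by_index
-- ===== SOURCE A (Python) =====
-- from collections import defaultdict
--
-- def _index_from_name(orf):
--     parts=orf.rsplit("_",1)
--     if len(parts)==2:
--         try: return parts[0],int(parts[1])
--         except ValueError: pass
--     return orf,0
--
-- def cluster_by_index(orf_set,max_gap=5):
--     by_c=defaultdict(list)
--     for orf in orf_set:
--         c,i=_index_from_name(orf); by_c[c].append((i,orf))
--     clusters=[]
--     for c,entries in by_c.items():
--         entries.sort(key=lambda x:x[0]); group=[entries[0][1]]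
--         for i in range(1,len(entries)):
--             if entries[i][0]-entries[i-1][0]<=max_gap: group.append(entries[i][1])
--             else: clusters.append(group); group=[entries[i][1]]
--         clusters.append(group)
--     return clusters
-- ===== SOURCE B (Python) =====
-- def _name_index(orf):
--     parts = orf.rsplit("_", 1)
--     if len(parts) == 2:
--         try:
--             return parts[0], int(parts[1])
--         except ValueError:
--             pass
--     return orf, 0
--
-- def cluster_by_index(orf_set, max_gap=5):
--     by_c = {}
--     for orf in orf_set:
--         c, i = _name_index(orf)
--         if c in by_c:
--             by_c[c].append((i, orf))
--         else:
--             by_c[c] = [(i, orf)]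
--     clusters = []
--     for entries in by_c.values():
--         entries.sort(key=lambda x: x[0])
--         out = []
--         for i, o in reversed(entries):
--             if out and out[0][0] - i <= max_gap:
--                 out[0] = (i, [o] + out[0][1])
--             else:
--                 out.insert(0, (i, [o]))
--         clusters.extend(ns for _, ns in out)
--     return clusters
-- ===== Notes on version B (the rewrite author's own statement) =====
-- stated objective: alternative
-- what changed: Per-contig clusters are built by a reverse traversal that merges each ORF into the front cluster or opens a new front cluster, replacing A's forward grow-or-flush accumulator loop; grouping uses a plain dict with an explicit membership branch instead of defaultdict.
import Mathlib
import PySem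

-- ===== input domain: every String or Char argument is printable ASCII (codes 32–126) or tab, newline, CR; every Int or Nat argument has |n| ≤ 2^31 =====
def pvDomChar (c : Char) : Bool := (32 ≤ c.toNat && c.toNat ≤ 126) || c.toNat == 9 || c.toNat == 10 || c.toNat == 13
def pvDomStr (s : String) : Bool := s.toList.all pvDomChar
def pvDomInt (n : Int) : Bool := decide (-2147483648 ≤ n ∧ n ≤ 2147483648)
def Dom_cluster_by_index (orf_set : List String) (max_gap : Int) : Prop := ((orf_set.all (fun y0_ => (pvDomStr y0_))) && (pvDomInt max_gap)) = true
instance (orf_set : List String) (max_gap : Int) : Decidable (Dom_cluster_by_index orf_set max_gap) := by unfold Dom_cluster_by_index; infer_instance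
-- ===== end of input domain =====

-- B builds each contig's clusters by a reverse traversal that merges each ORF into the
-- front cluster (or opens a new front cluster), instead of A's forward grow-or-flush
-- accumulator loop; objective: alternative decomposition, same cost.

-- ===== PORT A =====
-- orf.rsplit("_", 1): some (before, after) at the LAST '_', none when '_' is absent.
-- (Hand-ported: PySem has no rsplit; exact for a single-char separator with maxsplit 1.)
def pvRsplitLastUnd : List Char → Option (List Char × List Char)
  | [] => none
  | c :: rest =>
    match pvRsplitLastUnd rest with
    | some (a, b) => some (c :: a, b)
    | none => if c = '_' then some ([], rest) else none

-- _index_from_name (shared by Source A and Source B verbatim: Source B's _name_index is the same code)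
def pvIndexFromName (orf : String) : String × Int :=
  match pvRsplitLastUnd orf.toList with
  | some (a, b) =>
    match PySem.Int.ofChars? b with   -- int(parts[1]); none = ValueError, caught
    | some n => (String.ofList a, n)
    | none => (orf, 0)
  | none => (orf, 0)

-- A's inner loop over range(1, len(entries)) as structural recursion carrying the
-- previous index, current group and flushed clusters (entries[i-1][0] = prev).
def pvLoopA (mg : Int) (clusters : List (List String)) (group : List String) (prev : Int) :
    List (Int × String) → List (List String)
  | [] => clusters ++ [group]
  | (i, o) :: rest =>
    if i - prev ≤ mg then pvLoopA mg clusters (group ++ [o]) i rest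
    else pvLoopA mg (clusters ++ [group]) [o] i rest

def cluster_by_index (orf_set : List String) (max_gap : Int) : List (List String) :=
  let by_c : PySem.Dict String (List (Int × String)) :=
    orf_set.foldl (fun d orf =>
      let ci := pvIndexFromName orf
      d.insert ci.1 (d.getD ci.1 [] ++ [(ci.2, orf)])) PySem.Dict.empty
  by_c.items.foldl (fun clusters ce =>
    match PySem.List.sorted ce.2 (fun x => x.1) false with
    | [] => clusters          -- unreachable: dict values are nonempty (entries[0] in Python)
    | (p, o) :: rest => pvLoopA max_gap clusters [o] p rest) []

-- ===== PORT B =====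
-- Source B's reversed(entries) loop: out is built back-to-front; the element before the
-- current front cluster is merged into it when the gap is small, else opens a new one.
def pvSplitR (mg : Int) : List (Int × String) → List (Int × List String)
  | [] => []
  | (i, o) :: t =>
    match pvSplitR mg t with
    | (j, ns) :: rest =>
      if j - i ≤ mg then (i, o :: ns) :: rest else (i, [o]) :: (j, ns) :: rest
    | [] => [(i, [o])]

def cluster_by_index_alt (orf_set : List String) (max_gap : Int) : List (List String) :=
  let by_c : PySem.Dict String (List (Int × String)) :=
    orf_set.foldl (fun d orf =>
      let ci := pvIndexFromName orf
      match d.get? ci.1 with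
      | some l => d.insert ci.1 (l ++ [(ci.2, orf)])
      | none => d.insert ci.1 [(ci.2, orf)]) PySem.Dict.empty
  by_c.values.foldl (fun clusters entries =>
    clusters ++ (pvSplitR max_gap (PySem.List.sorted entries (fun x => x.1) false)).map Prod.snd) []

-- ===== PRECONDITION & SPEC =====
def Spec_cluster_by_index (orf_set : List String) (max_gap : Int) (out : List (List String)) : Prop := out = cluster_by_index_alt orf_set max_gap
instance (orf_set : List String) (max_gap : Int) (out : List (List String)) : Decidable (Spec_cluster_by_index orf_set max_gap out) := by unfold Spec_cluster_by_index; infer_instance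

-- ===== CLAIM (what is proved, stated in full; the proofs are below) =====
def Claim_equal_cluster_by_index : Prop := ∀ (orf_set : List String) (max_gap : Int), Dom_cluster_by_index orf_set max_gap → Spec_cluster_by_index orf_set max_gap (cluster_by_index orf_set max_gap)

-- ===== LEMMAS AND PROOFS =====

-- canonical per-group split relative to a previous index: (names joining the current
-- group, the later clusters)
def pvChop (mg : Int) : Int → List (Int × String) → List String × List (List String)
  | _, [] => ([], [])
  | p, (q, r) :: t =>
    let fo := pvChop mg q t
    if q - p ≤ mg then (r :: fo.1, fo.2) else ([], (r :: fo.1) :: fo.2)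

theorem pvLoopA_chop (mg : Int) : ∀ (rest : List (Int × String)) (p : Int)
    (g : List String) (clusters : List (List String)),
    pvLoopA mg clusters g p rest =
      clusters ++ (g ++ (pvChop mg p rest).1) :: (pvChop mg p rest).2 := by
  intro rest
  induction rest with
  | nil => intro p g clusters; simp [pvLoopA, pvChop]
  | cons qr t ih =>
    intro p g clusters
    obtain ⟨q, r⟩ := qr
    by_cases h : q - p ≤ mg
    · simp [pvLoopA, pvChop, h, ih]
    · simp [pvLoopA, pvChop, h, ih]

theorem pvSplitR_chop (mg : Int) : ∀ (rest : List (Int × String)) (p : Int) (o : String),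
    ∃ os, pvSplitR mg ((p, o) :: rest) = (p, o :: (pvChop mg p rest).1) :: os ∧
      os.map Prod.snd = (pvChop mg p rest).2 := by
  intro rest
  induction rest with
  | nil => intro p o; exact ⟨[], by simp [pvSplitR, pvChop]⟩
  | cons qr t ih =>
    intro p o
    obtain ⟨q, r⟩ := qr
    obtain ⟨os, hsp, hmap⟩ := ih q r
    have hstep : pvSplitR mg ((p, o) :: (q, r) :: t) =
        match pvSplitR mg ((q, r) :: t) with
        | (j, ns) :: rest =>
          if j - p ≤ mg then (p, o :: ns) :: rest else (p, [o]) :: (j, ns) :: rest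
        | [] => [(p, [o])] := rfl
    rw [hsp] at hstep
    by_cases h : q - p ≤ mg
    · exact ⟨os, by simp [hstep, pvChop, h], by simp [hmap, pvChop, h]⟩
    · exact ⟨(q, r :: (pvChop mg q t).1) :: os,
        by simp [hstep, pvChop, h], by simp [hmap, pvChop, h]⟩

-- per-group step equality
theorem pvGroup_eq (mg : Int) (entries : List (Int × String)) (clusters : List (List String)) :
    (match PySem.List.sorted entries (fun x => x.1) false with
      | [] => clusters
      | (p, o) :: rest => pvLoopA mg clusters [o] p rest) =
    clusters ++ (pvSplitR mg (PySem.List.sorted entries (fun x => x.1) false)).map Prod.snd := by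
  cases hs : PySem.List.sorted entries (fun x => x.1) false with
  | nil => simp [pvSplitR]
  | cons po rest =>
    obtain ⟨p, o⟩ := po
    obtain ⟨os, hsp, hmap⟩ := pvSplitR_chop mg rest p o
    simp [pvLoopA_chop, hsp, hmap]

-- the two grouping folds build the same dict
theorem pvDict_eq (orf_set : List String) :
    orf_set.foldl (fun d orf =>
      let ci := pvIndexFromName orf
      PySem.Dict.insert d ci.1 (PySem.Dict.getD d ci.1 [] ++ [(ci.2, orf)]))
      (PySem.Dict.empty : PySem.Dict String (List (Int × String))) =
    orf_set.foldl (fun d orf =>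
      let ci := pvIndexFromName orf
      match PySem.Dict.get? d ci.1 with
      | some l => PySem.Dict.insert d ci.1 (l ++ [(ci.2, orf)])
      | none => PySem.Dict.insert d ci.1 [(ci.2, orf)]) PySem.Dict.empty := by
  apply PySem.List.foldl_congr_mem
  intro d orf _
  cases h : PySem.Dict.get? d (pvIndexFromName orf).1 <;>
    simp [PySem.Dict.getD, h]

-- ===== VERDICT (by name: the statement is the Claim_ definition above) =====
theorem cluster_by_index_spec : Claim_equal_cluster_by_index := by
  intro orf_set max_gap _
  unfold Spec_cluster_by_index cluster_by_index cluster_by_index_alt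
  rw [pvDict_eq]
  generalize (orf_set.foldl (fun d orf =>
      let ci := pvIndexFromName orf
      match PySem.Dict.get? d ci.1 with
      | some l => PySem.Dict.insert d ci.1 (l ++ [(ci.2, orf)])
      | none => PySem.Dict.insert d ci.1 [(ci.2, orf)])
      (PySem.Dict.empty : PySem.Dict String (List (Int × String)))) = d
  show d.items.foldl _ [] = d.values.foldl _ []
  have hv : d.values = d.items.map Prod.snd := rfl
  rw [hv, List.foldl_map]
  apply PySem.List.foldl_congr_mem
  intro cl ce _
  exact pvGroup_eq max_gap ce.2 cl
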